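-- pv_equiv track=rewrite | github.com/pypi-data/pypi-mirror-402 | packages/md-babel-py/md_babel_py-1.1.1-py3-none-any.whl/md_babel_py/parser.py | parse_info_string
-- ===== SOURCE A (Python) =====
-- def parse_info_string(info: str) -> tuple[str, dict[str, str], set[str]]:
--     """Parse info string into language, metadata dict, and flags set.
--
--     Example: "python session=main expected-error" -> ("python", {"session": "main"}, {"expected-error"})
--     Example: 'python fold="Show Code"' -> ("python", {"fold": "Show Code"}, set())
--     """
--     info = info.strip()
--     if not info:
--         return "", {}, set()
--
--     # Tokenize respecting quoted strings
--     parts = tokenize_info_string(info)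
--     if not parts:
--         return "", {}, set()
--
--     language = parts[0]
--     metadata = {}
--     flags = set()
--
--     for part in parts[1:]:
--         if "=" in part:
--             key, value = part.split("=", 1)
--             # Remove surrounding quotes if present
--             if len(value) >= 2 and value[0] in ('"', "'") and value[-1] == value[0]:
--                 value = value[1:-1]
--             metadata[key] = value
--         else:
--             flags.add(part)
--
--     return language, metadata, flags
--
-- def tokenize_info_string(info: str) -> list[str]:
--     """Tokenize info string, respecting quoted values.
--
--     Example: 'python fold="Show Code" skip' -> ['python', 'fold="Show Code"', 'skip']
--     """
--     tokens = []
--     current = []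
--     in_quotes = False
--     quote_char = None
--
--     for char in info:
--         if char in ('"', "'") and not in_quotes:
--             in_quotes = True
--             quote_char = char
--             current.append(char)
--         elif char == quote_char and in_quotes:
--             in_quotes = False
--             quote_char = None
--             current.append(char)
--         elif char.isspace() and not in_quotes:
--             if current:
--                 tokens.append(''.join(current))
--                 current = []
--         else:
--             current.append(char)
--
--     if current:
--         tokens.append(''.join(current))
--
--     return tokens
-- ===== SOURCE B (Python) =====
-- def parse_info_string(info: str) -> tuple[str, dict[str, str], set[str]]:
--     """Parse info string into language, metadata dict, and flags set.
--
--     Tokenizes token-at-a-time with an index cursor: skip whitespace, then read a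
--     token, jumping over quoted segments with str.find instead of a per-character
--     in_quotes state machine.
--     """
--     info = info.strip()
--     if not info:
--         return "", {}, set()
--
--     tokens = []
--     i, n = 0, len(info)
--     while i < n:
--         if info[i].isspace():
--             i += 1
--             continue
--         buf = ""
--         while i < n and not info[i].isspace():
--             c = info[i]
--             if c in ('"', "'"):
--                 j = info.find(c, i + 1)
--                 if j == -1:
--                     buf += info[i:]
--                     i = n
--                 else:
--                     buf += info[i:j + 1]
--                     i = j + 1
--             else:
--                 buf += c
--                 i += 1
--         tokens.append(buf)
--
--     if not tokens:
--         return "", {}, set()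
--
--     language = tokens[0]
--     metadata = {}
--     flags = set()
--     for part in tokens[1:]:
--         key, eq, value = part.partition("=")
--         if eq:
--             if len(value) >= 2 and value[0] in ('"', "'") and value[-1] == value[0]:
--                 value = value[1:-1]
--             metadata[key] = value
--         else:
--             flags.add(part)
--
--     return language, metadata, flags
-- ===== Notes on version B (the rewrite author's own statement) =====
-- stated objective: alternative
-- what changed: Tokenization is re-done as a token-at-a-time cursor scan that jumps over quoted segments with str.find (and partition('=') for metadata), replacing A's per-character in_quotes/quote_char finite-state loop.
import Mathlib
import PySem

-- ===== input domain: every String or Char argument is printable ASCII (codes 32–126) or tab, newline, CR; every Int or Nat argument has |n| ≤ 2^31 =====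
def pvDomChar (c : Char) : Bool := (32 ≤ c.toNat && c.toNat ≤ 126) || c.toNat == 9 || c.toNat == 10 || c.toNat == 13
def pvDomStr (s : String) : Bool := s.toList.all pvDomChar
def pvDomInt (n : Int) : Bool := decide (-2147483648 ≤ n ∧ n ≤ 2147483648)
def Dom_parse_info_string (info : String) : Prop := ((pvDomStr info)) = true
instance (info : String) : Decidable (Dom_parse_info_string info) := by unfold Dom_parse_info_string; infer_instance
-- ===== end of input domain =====

-- B replaces A's per-character in_quotes/quote_char state machine by a token-at-a-time
-- cursor scan that jumps over quoted segments with find (objective: alternative; same cost).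

-- ===== PORT A =====

-- shared by both ports: the quote-stripping line of the metadata value is
-- literally identical in A and in B ("remove surrounding quotes if present")
def pvUnquote (value : List Char) : List Char :=
  if 2 ≤ value.length ∧
      (PySem.List.pyGet? value 0 = some '"' ∨ PySem.List.pyGet? value 0 = some '\'') ∧
      PySem.List.pyGet? value (-1) = PySem.List.pyGet? value 0 then
    PySem.List.slice value (some 1) (some (-1))
  else value

-- A's tokenize_info_string loop: state (tokens, current, in_quotes, quote_char)
def pvTokA : List Char → List (List Char) → List Char → Bool → Option Char → List (List Char)
  | [], tokens, current, _, _ => if current = [] then tokens else tokens ++ [current]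
  | c :: rest, tokens, current, inq, q =>
    if (c = '"' ∨ c = '\'') ∧ inq = false then
      pvTokA rest tokens (current ++ [c]) true (some c)
    else if q = some c ∧ inq = true then
      pvTokA rest tokens (current ++ [c]) false none
    else if PySem.Chars.isspace c = true ∧ inq = false then
      if current = [] then pvTokA rest tokens [] inq q
      else pvTokA rest (tokens ++ [current]) [] inq q
    else
      pvTokA rest tokens (current ++ [c]) inq q

-- A's `for part in parts[1:]` loop over (metadata, flags)
def pvParseA : List (List Char) → PySem.Dict String String → PySem.Set String →
    PySem.Dict String String × PySem.Set String
  | [], md, fl => (md, fl)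
  | part :: rest, md, fl =>
    if PySem.Chars.isIn ['='] part then
      -- hand port of part.split("=", 1): exact under the '=' ∈ part guard, where the
      -- split is [chars before the first '=', everything after it]
      let key := part.takeWhile (fun d => d ≠ '=')
      let value := (part.dropWhile (fun d => d ≠ '=')).drop 1
      pvParseA rest (md.insert (String.ofList key) (String.ofList (pvUnquote value))) fl
    else
      pvParseA rest md (fl.add (String.ofList part))

def parse_info_string (info : String) : String × (List (String × String)) × List String :=
  let s := PySem.Chars.strip info.toList
  if s = [] then ("", [], [])
  else
    match pvTokA s [] [] false none with
    | [] => ("", [], [])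
    | p :: rest =>
      let (md, fl) := pvParseA rest (PySem.Dict.mk []) []
      (String.ofList p, md.items, fl)

-- ===== PORT B =====

-- B's inner while: read one token starting at the cursor, jumping over a quoted
-- segment to the matching quote found with find (or to end of string if absent)
def pvReadTok : List Char → List Char × List Char
  | [] => ([], [])
  | c :: rest =>
    if PySem.Chars.isspace c = true then ([], c :: rest)
    else if c = '"' ∨ c = '\'' then
      match h : rest.dropWhile (fun d => d ≠ c) with
      | [] => (c :: rest, [])                      -- j == -1: swallow the rest
      | _ :: r' =>
        let (buf, r'') := pvReadTok r'
        (c :: rest.takeWhile (fun d => d ≠ c) ++ [c] ++ buf, r'')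
    else
      let (buf, r'') := pvReadTok rest
      (c :: buf, r'')
termination_by cs => cs.length
decreasing_by
  · have := List.length_dropWhile_le (fun d => d ≠ c) rest
    rw [h] at this; simp at this ⊢; omega
  · simp


-- termination lemma for pvTokB (cited in its decreasing_by): a token read from a
-- non-space position consumes at least one character
theorem pvReadTok_snd_lt (c : Char) (rest : List Char)
    (hsp : ¬ PySem.Chars.isspace c = true) :
    ((pvReadTok (c :: rest)).2).length < (c :: rest).length := by
  have hle : ∀ cs : List Char, ((pvReadTok cs).2).length ≤ cs.length := by
    intro cs
    fun_induction pvReadTok cs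
    · simp
    · simp
    · simp
    · rename_i c' rest' hsp' hq' d r' hdw buf r2 heq ih
      rw [heq] at ih
      have hl := List.length_dropWhile_le (fun d => d ≠ c') rest'
      rw [hdw] at hl
      simp at ih hl ⊢
      omega
    · rename_i c' rest' hsp' hq' buf r2 heq ih
      rw [heq] at ih
      simp at ih ⊢
      omega
  rw [pvReadTok]
  rw [if_neg hsp]
  by_cases hq : c = '"' ∨ c = '\''
  · rw [if_pos hq]
    cases hdw : rest.dropWhile (fun d => d ≠ c) with
    | nil => simp
    | cons d r' =>
      have h1 := hle r'
      have h2 := List.length_dropWhile_le (fun d => d ≠ c) rest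
      rw [hdw] at h2
      simp at h2 ⊢
      omega
  · rw [if_neg hq]
    have := hle rest
    simp
    omega

-- B's outer while: skip whitespace, read a token, repeat
def pvTokB : List Char → List (List Char)
  | [] => []
  | c :: rest =>
    if h : PySem.Chars.isspace c = true then pvTokB rest
    else
      (pvReadTok (c :: rest)).1 :: pvTokB (pvReadTok (c :: rest)).2
termination_by cs => cs.length
decreasing_by
  · simp
  · exact pvReadTok_snd_lt c rest h

-- B's `for part in tokens[1:]` loop using partition("=")
def pvParseB : List (List Char) → PySem.Dict String String → PySem.Set String →
    PySem.Dict String String × PySem.Set String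
  | [], md, fl => (md, fl)
  | part :: rest, md, fl =>
    let key := part.takeWhile (fun d => d ≠ '=')
    match part.dropWhile (fun d => d ≠ '=') with
    | [] => pvParseB rest md (fl.add (String.ofList part))
    | _ :: value => pvParseB rest (md.insert (String.ofList key) (String.ofList (pvUnquote value))) fl

def parse_info_string_alt (info : String) : String × (List (String × String)) × List String :=
  let s := PySem.Chars.strip info.toList
  if s = [] then ("", [], [])
  else
    match pvTokB s with
    | [] => ("", [], [])
    | p :: rest =>
      let (md, fl) := pvParseB rest (PySem.Dict.mk []) []
      (String.ofList p, md.items, fl)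

-- ===== PRECONDITION & SPEC =====
def Spec_parse_info_string (info : String) (out : String × (List (String × String)) × List String) : Prop := out = parse_info_string_alt info
instance (info : String) (out : String × (List (String × String)) × List String) : Decidable (Spec_parse_info_string info out) := by unfold Spec_parse_info_string; infer_instance

-- ===== CLAIM (what is proved, stated in full; the proofs are below) =====
def Claim_equal_parse_info_string : Prop := ∀ (info : String), Dom_parse_info_string info → Spec_parse_info_string info (parse_info_string info)

-- ===== LEMMAS AND PROOFS =====


-- a nonempty dropWhile: its head falsifies the predicate and the list splits there
theorem pvDropWhile_cons (p : Char → Bool) (l : List Char) (d : Char) (r : List Char)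
    (h : l.dropWhile p = d :: r) : p d = false ∧ l = l.takeWhile p ++ d :: r := by
  induction l with
  | nil => simp at h
  | cons a l ih =>
    by_cases hp : p a
    · rw [List.dropWhile_cons_of_pos hp] at h
      obtain ⟨h1, h2⟩ := ih h
      exact ⟨h1, by rw [List.takeWhile_cons_of_pos hp]; simpa using h2⟩
    · rw [List.dropWhile_cons_of_neg hp] at h
      obtain ⟨rfl, rfl⟩ := List.cons.injEq .. ▸ h
      refine ⟨by simpa using hp, ?_⟩
      rw [List.takeWhile_cons_of_neg hp]
      simp

-- one step of A out of quotes: inside quotes A copies verbatim up to the matching quote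
theorem tokA_quoted (q : Char) : ∀ (cs : List Char) (tokens : List (List Char)) (current : List Char),
    pvTokA cs tokens current true (some q) =
      match cs.dropWhile (fun d => d ≠ q) with
      | [] => if current ++ cs = [] then tokens else tokens ++ [current ++ cs]
      | _ :: r' => pvTokA r' tokens (current ++ cs.takeWhile (fun d => d ≠ q) ++ [q]) false none := by
  intro cs
  induction cs with
  | nil => intro tokens current; simp [pvTokA]
  | cons c cs ih =>
    intro tokens current
    by_cases hc : c = q
    · subst hc
      simp only [pvTokA]
      rw [if_neg (by simp), if_pos (by simp)]
      simp [List.dropWhile_cons, List.takeWhile_cons]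
    · simp only [pvTokA]
      rw [if_neg (by simp), if_neg (by simp; exact fun h => hc h.symm), if_neg (by simp)]
      rw [ih]
      cases hdw : cs.dropWhile (fun d => !decide (d = q)) <;>
        simp [List.dropWhile_cons, List.takeWhile_cons, hc, hdw, List.append_assoc]

theorem pvReadTok_append : ∀ cs : List Char, (pvReadTok cs).1 ++ (pvReadTok cs).2 = cs := by
  intro cs
  fun_induction pvReadTok cs
  · rfl
  · rfl
  · simp
  · rename_i c rest hsp hq d r' hdw buf r2 heq ih
    rw [heq] at ih
    simp at ih
    obtain ⟨hd, hsplit⟩ := pvDropWhile_cons _ _ _ _ hdw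
    have hdc : d = c := by simpa using hd
    subst hdc
    conv_rhs => rw [hsplit]
    simp [ih]
  · rename_i c rest hsp hq buf r2 heq ih
    rw [heq] at ih
    simp at ih ⊢
    exact ih

theorem pvReadTok_snd_space : ∀ cs : List Char, (pvReadTok cs).2 = [] ∨
    ∃ d r', (pvReadTok cs).2 = d :: r' ∧ PySem.Chars.isspace d = true := by
  intro cs
  fun_induction pvReadTok cs
  · left; rfl
  · rename_i c rest h; right; exact ⟨c, rest, rfl, h⟩
  · left; rfl
  · rename_i c rest hsp hq d r' hdw buf r2 heq ih
    rw [heq] at ih; simpa using ih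
  · rename_i c rest hsp hq buf r2 heq ih
    rw [heq] at ih; simpa using ih

theorem pvReadTok_fst_cons (c : Char) (rest : List Char)
    (hsp : ¬ PySem.Chars.isspace c = true) :
    ∃ b, (pvReadTok (c :: rest)).1 = c :: b := by
  rw [pvReadTok, if_neg hsp]
  by_cases hq : c = '"' ∨ c = '\''
  · rw [if_pos hq]
    cases h : rest.dropWhile (fun d => d ≠ c) with
    | nil => exact ⟨rest, rfl⟩
    | cons d r' => exact ⟨_, rfl⟩
  · rw [if_neg hq]
    exact ⟨_, rfl⟩

theorem space_not_quote {c : Char} (h : PySem.Chars.isspace c = true) :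
    ¬ (c = '"' ∨ c = '\'') := by
  rintro (rfl | rfl) <;> simp [PySem.Chars.isspace] at h

theorem tokA_step : ∀ (n : Nat) (cs : List Char), cs.length ≤ n →
    ∀ (tokens : List (List Char)) (current : List Char),
    pvTokA cs tokens current false none =
      pvTokA (pvReadTok cs).2 tokens (current ++ (pvReadTok cs).1) false none := by
  intro n
  induction n with
  | zero =>
    intro cs hcs tokens current
    have : cs = [] := by simpa using List.length_eq_zero_iff.mp (Nat.le_zero.mp hcs)
    subst this; simp [pvReadTok]
  | succ n ih =>
    intro cs hcs tokens current
    match cs with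
    | [] => simp [pvReadTok]
    | c :: rest =>
      by_cases hsp : PySem.Chars.isspace c = true
      · rw [pvReadTok, if_pos hsp]; simp
      · by_cases hq : c = '"' ∨ c = '\''
        · have hA : pvTokA (c :: rest) tokens current false none
              = pvTokA rest tokens (current ++ [c]) true (some c) := by
            simp only [pvTokA]; rw [if_pos (by simp [hq])]
          rw [hA, tokA_quoted, pvReadTok, if_neg hsp, if_pos hq]
          cases hdw : rest.dropWhile (fun d => d ≠ c) with
          | nil => simp [pvTokA]
          | cons d r' =>
            have hlen : r'.length ≤ n := by
              have hl := List.length_dropWhile_le (fun d => d ≠ c) rest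
              rw [hdw] at hl
              simp at hl hcs
              omega
            simp only []
            rw [ih r' hlen]
            simp [List.append_assoc]
        · have hA : pvTokA (c :: rest) tokens current false none
              = pvTokA rest tokens (current ++ [c]) false none := by
            simp only [pvTokA]
            rw [if_neg (by simp [hq]), if_neg (by simp), if_neg (by simp [hsp])]
          rw [hA, ih rest (by simpa using Nat.le_of_succ_le_succ hcs),
              pvReadTok, if_neg hsp, if_neg hq]
          simp [List.append_assoc]

theorem tokA_eq_tokB : ∀ (n : Nat) (cs : List Char), cs.length ≤ n →
    ∀ tokens : List (List Char), pvTokA cs tokens [] false none = tokens ++ pvTokB cs := by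
  intro n
  induction n with
  | zero =>
    intro cs hcs tokens
    have : cs = [] := by simpa using List.length_eq_zero_iff.mp (Nat.le_zero.mp hcs)
    subst this; simp [pvTokA, pvTokB]
  | succ n ih =>
    intro cs hcs tokens
    match cs with
    | [] => simp [pvTokA, pvTokB]
    | c :: rest =>
      by_cases hsp : PySem.Chars.isspace c = true
      · have hA : pvTokA (c :: rest) tokens [] false none
            = pvTokA rest tokens [] false none := by
          simp only [pvTokA]
          rw [if_neg (by simp [space_not_quote hsp]), if_neg (by simp), if_pos (by simp [hsp])]
          simp
        rw [hA, ih rest (by simpa using Nat.le_of_succ_le_succ hcs), pvTokB, dif_pos hsp]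
      · obtain ⟨b, hb⟩ := pvReadTok_fst_cons c rest hsp
        have hstep := tokA_step (n + 1) (c :: rest) hcs tokens []
        rw [hstep]
        have happ := pvReadTok_append (c :: rest)
        have hBtok : pvTokB (c :: rest)
            = (pvReadTok (c :: rest)).1 :: pvTokB (pvReadTok (c :: rest)).2 := by
          rw [pvTokB, dif_neg hsp]
        rcases pvReadTok_snd_space (c :: rest) with hnil | ⟨d, r', hdr, hdsp⟩
        · rw [hnil, hb]
          rw [hnil] at hBtok
          simp [pvTokA, pvTokB, hBtok, hb]
        · rw [hdr, hb]
          simp only [List.nil_append]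
          have hA2 : pvTokA (d :: r') tokens (c :: b) false none
              = pvTokA r' (tokens ++ [c :: b]) [] false none := by
            simp only [pvTokA]
            rw [if_neg (by simp [space_not_quote hdsp]), if_neg (by simp),
                if_pos (by simp [hdsp]), if_neg (by simp)]
          have hlen : r'.length ≤ n := by
            have h1 : (pvReadTok (c :: rest)).1.length + (pvReadTok (c :: rest)).2.length
                = rest.length + 1 := by
              rw [← List.length_append, happ]; simp
            rw [hb, hdr] at h1
            simp at h1 hcs
            omega
          rw [hA2, ih r' hlen]
          have hBr : pvTokB (d :: r') = pvTokB r' := by rw [pvTokB, dif_pos hdsp]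
          rw [hBtok, hdr, hb, hBr]
          simp

theorem mem_iff_isIn (a : Char) (l : List Char) :
    PySem.Chars.isIn [a] l = true ↔ a ∈ l := by
  rw [PySem.Chars.isIn_iff_infix]
  constructor
  · intro h
    exact (List.singleton_sublist).mp h.sublist
  · intro h
    obtain ⟨s, t, rfl⟩ := List.append_of_mem h
    exact ⟨s, t, by simp⟩

theorem parse_eq : ∀ (parts : List (List Char)) (md : PySem.Dict String String)
    (fl : PySem.Set String), pvParseA parts md fl = pvParseB parts md fl := by
  intro parts
  induction parts with
  | nil => intro md fl; rfl
  | cons part rest ih =>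
    intro md fl
    by_cases h : PySem.Chars.isIn ['='] part = true
    · have hmem : '=' ∈ part := (mem_iff_isIn '=' part).mp h
      have hne : part.dropWhile (fun d => d ≠ '=') ≠ [] := by
        intro hnil
        rw [List.dropWhile_eq_nil_iff] at hnil
        have := hnil '=' hmem
        simp at this
      cases hdw : part.dropWhile (fun d => d ≠ '=') with
      | nil => exact absurd hdw hne
      | cons d r' =>
        simp only [pvParseA, pvParseB, if_pos h, hdw]
        simp [ih]
    · have hdw : part.dropWhile (fun d => d ≠ '=') = [] := by
        rw [List.dropWhile_eq_nil_iff]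
        intro x hx
        simp only [decide_eq_true_eq]
        intro hxe
        subst hxe
        exact h ((mem_iff_isIn '=' part).mpr hx)
      simp only [pvParseA, pvParseB, if_neg h, hdw]
      exact ih _ _

-- ===== VERDICT (by name: the statement is the Claim_ definition above) =====
theorem parse_info_string_spec : Claim_equal_parse_info_string := by
  intro info _
  show parse_info_string info = parse_info_string_alt info
  unfold parse_info_string parse_info_string_alt
  by_cases h : PySem.Chars.strip info.toList = []
  · simp [h]
  · simp only [h, if_neg h]
    rw [tokA_eq_tokB (PySem.Chars.strip info.toList).length _ le_rfl]
    simp only [List.nil_append]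
    cases htok : pvTokB (PySem.Chars.strip info.toList) with
    | nil => rfl
    | cons p rest => simp [parse_eq]
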